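-- pv_equiv track=rewrite | github.com/stacezhou/stcn_mmcv | stcn/dataset/vos_sampler.py | compact_to
-- ===== SOURCE A (Python) =====
-- def compact_to(target, options, nums, top=True):
--     'target: 10, options: 5,4,3,2, nums: 3 --> [5,3,2]'
--     if nums == 1:
--         for n in options:
--             if n == target:
--                 return [n]
--         return [None]
--
--     for n in options:
--         output = compact_to(target - n, options, nums - 1, False)
--         if None not in output:
--             return [n, *output]
--
--     return [None]
-- ===== SOURCE B (Python) =====
-- def compact_to(target, options, nums, top=True):
--     'target: 10, options: 5,4,3,2, nums: 3 --> [5,3,2]'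
--     if nums < 1:
--         return [None]
--     # reach[j] = set of sums achievable with exactly j+1 picks from options
--     reach = [set(options)]
--     for _ in range(nums - 1):
--         last = reach[-1]
--         reach.append({s + n for s in last for n in options})
--     if target not in reach[-1]:
--         return [None]
--     # reconstruct the first combination in A's search order
--     res = []
--     t = target
--     for j in range(nums - 1, 0, -1):
--         n = next(n for n in options if t - n in reach[j - 1])
--         res.append(n)
--         t -= n
--     res.append(t)
--     return res
-- ===== Notes on version B (the rewrite author's own statement) =====
-- stated objective: alternative
-- what changed: Replaces A's recursive depth-first search over pick sequences by building, once, the sets of sums reachable with exactly j picks (a layered DP) and then greedily reconstructing the same first-in-search-order combination from those sets; much faster when sums collide, but not measured faster on random wide-spread inputs.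
import Mathlib
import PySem

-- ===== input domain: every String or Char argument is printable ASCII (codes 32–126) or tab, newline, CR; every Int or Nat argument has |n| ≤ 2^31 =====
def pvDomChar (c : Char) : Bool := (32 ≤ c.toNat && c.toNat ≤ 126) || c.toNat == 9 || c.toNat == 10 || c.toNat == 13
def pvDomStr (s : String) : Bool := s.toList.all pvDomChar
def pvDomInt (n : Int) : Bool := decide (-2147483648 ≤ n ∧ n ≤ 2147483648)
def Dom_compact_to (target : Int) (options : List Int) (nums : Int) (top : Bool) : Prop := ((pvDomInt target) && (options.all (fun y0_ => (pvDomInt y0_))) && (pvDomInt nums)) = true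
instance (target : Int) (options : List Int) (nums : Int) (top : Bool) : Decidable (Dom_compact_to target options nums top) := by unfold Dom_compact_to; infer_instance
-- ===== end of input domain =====

-- ===== PORT A =====
-- header: B replaces A's recursive depth-first search by layered reachable-sum sets with
-- greedy reconstruction (same first combination); proof is about return values (no mutation).

-- the inner 'for n in options' loop of A (nums > 1 case)
def aLoop (opts : List Int) (f : Int → List (Option Int)) (t : Int) : List (Option Int) :=
  match opts with
  | [] => [none]
  | n :: rest =>
      let out := f (t - n)
      if none ∈ out then aLoop rest f t else some n :: out

-- the 'nums == 1' loop of A: first n in options equal to target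
def firstEq (opts : List Int) (t : Int) : List (Option Int) :=
  match opts with
  | [] => [none]
  | n :: rest => if n = t then [some n] else firstEq rest t

def compactA (options : List Int) : Nat → Int → List (Option Int)
  | 0, _ => [none]          -- only reached (under Pre_) with options = [], where A also returns [None]
  | 1, t => firstEq options t
  | (j+2), t => aLoop options (fun t' => compactA options (j+1) t') t

def compact_to (target : Int) (options : List Int) (nums : Int) (top : Bool) : List (Option Int) :=
  compactA options nums.toNat target

-- ===== PORT B =====
-- layer options j = reach[j] in Source B: set of sums of exactly j+1 picks
def layer (options : List Int) : Nat → PySem.Set Int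
  | 0 => PySem.Set.ofList options
  | j+1 => PySem.Set.ofList ((layer options j).flatMap (fun s => options.map (fun n => s + n)))

-- the reconstruction loop of Source B ('next(n for n in options if t - n in reach[j-1])')
def recon (options : List Int) (t : Int) : Nat → List (Option Int)
  | 0 => [some t]
  | j+1 =>
      match options.find? (fun n => PySem.Set.contains (layer options j) (t - n)) with
      | some n => some n :: recon options (t - n) j
      | none => [none]      -- dead branch: never reached under the reach-membership guard

def compact_to_alt (target : Int) (options : List Int) (nums : Int) (top : Bool) : List (Option Int) :=
  if nums < 1 then [none]
  else
    let k := nums.toNat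
    if PySem.Set.contains (layer options (k - 1)) target then recon options target (k - 1)
    else [none]

-- ===== PRECONDITION & SPEC =====
-- Pre_ excludes exactly the inputs where A recurses forever (RecursionError): nums ≤ 0 with nonempty options.
def Pre_compact_to (target : Int) (options : List Int) (nums : Int) (top : Bool) : Prop :=
  1 ≤ nums ∨ options = []
instance (target : Int) (options : List Int) (nums : Int) (top : Bool) : Decidable (Pre_compact_to target options nums top) := by unfold Pre_compact_to; infer_instance
def pvWitness_compact_to : Int × List Int × Int × Bool := (10, [5, 4, 3, 2], 3, true)

def Spec_compact_to (target : Int) (options : List Int) (nums : Int) (top : Bool) (out : List (Option Int)) : Prop := out = compact_to_alt target options nums top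
instance (target : Int) (options : List Int) (nums : Int) (top : Bool) (out : List (Option Int)) : Decidable (Spec_compact_to target options nums top out) := by unfold Spec_compact_to; infer_instance

-- ===== CLAIM (what is proved, stated in full; the proofs are below) =====
def Claim_equal_compact_to : Prop := ∀ (target : Int) (options : List Int) (nums : Int) (top : Bool), Dom_compact_to target options nums top → Pre_compact_to target options nums top → Spec_compact_to target options nums top (compact_to target options nums top)

-- ===== LEMMAS AND PROOFS =====

theorem mem_layer_zero (options : List Int) (t : Int) :
    t ∈ layer options 0 ↔ t ∈ options := by
  simp [layer, PySem.Set.mem_ofList]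

theorem mem_layer_succ (options : List Int) (j : Nat) (t : Int) :
    t ∈ layer options (j+1) ↔ ∃ n ∈ options, (t - n) ∈ layer options j := by
  constructor
  · intro h
    simp [layer, PySem.Set.mem_ofList, List.mem_flatMap] at h
    obtain ⟨s, hs, n, hn, rfl⟩ := h
    exact ⟨n, hn, by simpa using hs⟩
  · rintro ⟨n, hn, hs⟩
    simp [layer, PySem.Set.mem_ofList, List.mem_flatMap]
    exact ⟨t - n, hs, n, hn, by ring⟩

theorem firstEq_eq (opts : List Int) (t : Int) :
    firstEq opts t = if t ∈ opts then [some t] else [none] := by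
  induction opts with
  | nil => simp [firstEq]
  | cons n rest ih =>
      by_cases h : n = t
      · subst h; simp [firstEq]
      · simp [firstEq, h, ih, Ne.symm h]

theorem none_not_mem_recon (options : List Int) (j : Nat) (t : Int)
    (h : t ∈ layer options j) : none ∉ recon options t j := by
  induction j generalizing t with
  | zero => simp [recon]
  | succ j ih =>
      rw [mem_layer_succ] at h
      obtain ⟨n, hn, hs⟩ := h
      have hex : ∃ n ∈ options, PySem.Set.contains (layer options j) (t - n) = true := by
        exact ⟨n, hn, by simpa [PySem.Set.contains_iff] using hs⟩
      rw [← List.find?_isSome] at hex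
      obtain ⟨n0, hf⟩ := Option.isSome_iff_exists.mp hex
      have hp := List.find?_some hf
      simp only [recon, hf]
      have hmem : (t - n0) ∈ layer options j := by simpa [PySem.Set.contains_iff] using hp
      simp [ih _ hmem]

theorem aLoop_eq (options : List Int) (j : Nat)
    (f : Int → List (Option Int))
    (hf : ∀ t', f t' = if t' ∈ layer options j then recon options t' j else [none])
    (opts : List Int) (t : Int) :
    aLoop opts f t =
      match opts.find? (fun n => PySem.Set.contains (layer options j) (t - n)) with
      | some n => some n :: recon options (t - n) j
      | none => [none] := by
  induction opts with
  | nil => simp [aLoop]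
  | cons n rest ih =>
      by_cases h : (t - n) ∈ layer options j
      · simp [aLoop, hf, h, none_not_mem_recon options j (t - n) h]
      · simp [aLoop, hf, h, ih]

theorem compactA_eq (options : List Int) (j : Nat) (t : Int) :
    compactA options (j+1) t =
      if t ∈ layer options j then recon options t j else [none] := by
  induction j generalizing t with
  | zero => simp [compactA, firstEq_eq, mem_layer_zero, recon]
  | succ j ih =>
      rw [show j+1+1 = j+2 from rfl]
      have := aLoop_eq options j (fun t' => compactA options (j+1) t') ih options t
      rw [compactA, this]
      by_cases h : t ∈ layer options (j+1)
      · rw [if_pos h]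
        simp only [recon]
      · have hnone : options.find? (fun n => PySem.Set.contains (layer options j) (t - n)) = none := by
          rw [List.find?_eq_none]
          intro n hn
          intro hc
          exact h ((mem_layer_succ options j t).mpr ⟨n, hn, by simpa [PySem.Set.contains_iff] using hc⟩)
        rw [if_neg h, hnone]

theorem layer_nil (j : Nat) (t : Int) : t ∉ layer ([] : List Int) j := by
  induction j with
  | zero => simp [layer]
  | succ j ih => simp [mem_layer_succ]

-- ===== VERDICT (by name: the statement is the Claim_ definition above) =====
theorem compact_to_spec : Claim_equal_compact_to := by
  intro target options nums top _ hpre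
  unfold Spec_compact_to compact_to compact_to_alt
  rcases hpre with h1 | h1
  · have hlt : ¬ nums < 1 := by omega
    have hk : nums.toNat = (nums.toNat - 1) + 1 := by omega
    rw [hk, compactA_eq]
    simp only [hlt, if_false]
    by_cases h : target ∈ layer options (nums.toNat - 1)
    · simp [h]
    · simp [h]
  · subst h1
    have hA : ∀ m t, compactA [] m t = [none] := by
      intro m t
      match m with
      | 0 => rfl
      | 1 => rfl
      | (j+2) => simp [compactA, aLoop]
    rw [hA]
    by_cases hlt : nums < 1
    · simp [hlt]
    · simp only [hlt, if_false]
      have hc : PySem.Set.contains (layer [] (nums.toNat - 1)) target = false := by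
        simp [layer_nil]
      rw [hc]
      simp
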